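-- pv_equiv track=rewrite | github.com/hoanguyenedugix/python | fix_json_quotes.py | repair_json_text
-- ===== SOURCE A (Python) =====
-- def is_closing_context(text: str, pos: int):
--     """Heuristic: xác định quote có phải quote đóng không"""
--     n = len(text)
--     i = pos + 1
--     while i < n and text[i].isspace():
--         i += 1
--     if i >= n:
--         return True
--     return text[i] in [",", "}", "]", ":"]
--
-- def repair_json_text(text: str):
--     """Heuristic repair: escape các dấu " không hợp lệ trong chuỗi."""
--     out = []
--     in_string = False
--     escaped = False
--     i = 0
--     n = len(text)
--     while i < n:
--         ch = text[i]
--         if ch == '"' and not escaped: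
--             if not in_string:
--                 in_string = True
--                 out.append(ch)
--             else:
--                 if is_closing_context(text, i):
--                     in_string = False
--                     out.append(ch)
--                 else:
--                     out.append('\\\"')
--             i += 1
--             escaped = False
--             continue
--         if ch == "\\" and not escaped:
--             escaped = True
--             out.append(ch)
--             i += 1
--             continue
--         out.append(ch)
--         escaped = False
--         i += 1
--     return "".join(out)
-- ===== SOURCE B (Python) =====
-- def repair_json_text(text: str):
--     """Heuristic repair: escape invalid '"' characters inside strings.
--
--     One right-to-left pass precomputes, per position, whether the quote there
--     would be in closing context; the main pass then needs no inner scan.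
--     """
--     n = len(text)
--     closing = [False] * n
--     nxt = None  # next non-whitespace character strictly after position i
--     for i in range(n - 1, -1, -1):
--         closing[i] = nxt is None or nxt in ",}]:"
--         if not text[i].isspace():
--             nxt = text[i]
--     out = []
--     in_string = False
--     escaped = False
--     for i, ch in enumerate(text):
--         if escaped:
--             out.append(ch)
--             escaped = False
--         elif ch == '"':
--             if in_string and not closing[i]:
--                 out.append('\\"')
--             else:
--                 in_string = not in_string
--                 out.append(ch)
--         elif ch == '\\':
--             escaped = True
--             out.append(ch)
--         else:
--             out.append(ch)
--     return "".join(out)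
-- ===== Notes on version B (the rewrite author's own statement) =====
-- stated objective: alternative
-- what changed: Replaces A's on-demand forward whitespace scan (is_closing_context) at every quote with a closing-context table precomputed in one right-to-left pass, and restructures the main loop around an escaped-first branch over the zipped (char, flag) stream.
import Mathlib
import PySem

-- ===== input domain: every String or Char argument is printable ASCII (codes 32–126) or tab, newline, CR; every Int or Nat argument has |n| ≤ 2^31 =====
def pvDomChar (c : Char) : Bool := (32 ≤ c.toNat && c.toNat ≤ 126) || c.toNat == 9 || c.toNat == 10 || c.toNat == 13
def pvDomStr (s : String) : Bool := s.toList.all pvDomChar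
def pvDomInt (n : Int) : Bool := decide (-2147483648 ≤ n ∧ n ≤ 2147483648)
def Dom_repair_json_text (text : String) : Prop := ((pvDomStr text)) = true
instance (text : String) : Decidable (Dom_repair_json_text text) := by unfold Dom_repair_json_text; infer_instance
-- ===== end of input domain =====

-- B replaces A's inner forward whitespace scan (is_closing_context) by a closing-context
-- table precomputed in one right-to-left pass; return value proved identical (alternative).

-- ===== PORT A =====
-- is_closing_context: skip whitespace after pos; True at end-of-text, else membership test.
-- The while loop over i = pos+1.. is the recursion over the suffix after pos.
def pvClosingScan : List Char → Bool
  | [] => true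
  | c :: rest =>
    if PySem.Chars.isspace c then pvClosingScan rest
    else (c == ',' || c == '}' || c == ']' || c == ':')

-- A's while loop over index i; the suffix text[i:] is carried directly, so the
-- call is_closing_context(text, i) — the scan of text[i+1:] — is pvClosingScan of the tail.
def pvLoopA : List Char → Bool → Bool → List Char → List Char
  | [], _, _, out => out.reverse
  | ch :: rest, in_string, escaped, out =>
    if ch == '"' && !escaped then
      if !in_string then pvLoopA rest true false (ch :: out)
      else
        if pvClosingScan rest then pvLoopA rest false false (ch :: out)
        else pvLoopA rest in_string false ('"' :: '\\' :: out)
    else if ch == '\\' && !escaped then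
      pvLoopA rest in_string true (ch :: out)
    else
      pvLoopA rest in_string false (ch :: out)

def repair_json_text (text : String) : String :=
  String.ofList (pvLoopA text.toList false false [])

-- ===== PORT B =====
-- right-to-left pass: per position the closing flag, plus the first non-whitespace
-- character of the processed suffix (Python's `nxt`).
def pvTable : List Char → List Bool × Option Char
  | [] => ([], none)
  | c :: rest =>
    let (tbl, nxt) := pvTable rest
    let cl := match nxt with
      | none => true
      | some x => x == ',' || x == '}' || x == ']' || x == ':'
    (cl :: tbl, if PySem.Chars.isspace c then nxt else some c)

-- B's main pass over the characters zipped with their closing flags.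
def pvLoopB : List (Char × Bool) → Bool → Bool → List Char → List Char
  | [], _, _, out => out.reverse
  | (ch, cl) :: rest, in_string, escaped, out =>
    if escaped then pvLoopB rest in_string false (ch :: out)
    else if ch == '"' then
      if in_string && !cl then pvLoopB rest in_string false ('"' :: '\\' :: out)
      else pvLoopB rest (!in_string) false (ch :: out)
    else if ch == '\\' then pvLoopB rest in_string true (ch :: out)
    else pvLoopB rest in_string false (ch :: out)

def repair_json_text_alt (text : String) : String :=
  String.ofList (pvLoopB (text.toList.zip (pvTable text.toList).1) false false [])

-- ===== PRECONDITION & SPEC =====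
def Spec_repair_json_text (text : String) (out : String) : Prop := out = repair_json_text_alt text
instance (text : String) (out : String) : Decidable (Spec_repair_json_text text out) := by unfold Spec_repair_json_text; infer_instance

-- ===== CLAIM (what is proved, stated in full; the proofs are below) =====
def Claim_equal_repair_json_text : Prop := ∀ (text : String), Dom_repair_json_text text → Spec_repair_json_text text (repair_json_text text)

-- ===== LEMMAS AND PROOFS =====

-- `nxt` returned by the table is the first non-whitespace character of the suffix,
-- and pvClosingScan is exactly the closing test applied to that character.
theorem pvClosingScan_eq_table (cs : List Char) :
    pvClosingScan cs = (match (pvTable cs).2 with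
      | none => true
      | some x => x == ',' || x == '}' || x == ']' || x == ':') := by
  induction cs with
  | nil => rfl
  | cons c rest ih =>
    simp only [pvClosingScan, pvTable]
    by_cases h : PySem.Chars.isspace c <;> simp [h, ih]

-- main loop equivalence: A's scan-on-demand loop equals B's table-driven loop.
theorem pvLoop_eq (cs : List Char) : ∀ (s e : Bool) (out : List Char),
    pvLoopA cs s e out = pvLoopB (cs.zip (pvTable cs).1) s e out := by
  induction cs with
  | nil => intro s e out; rfl
  | cons ch rest ih =>
    intro s e out
    simp only [pvTable, pvLoopA, List.zip_cons_cons, pvLoopB]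
    have hcl : pvClosingScan rest = (match (pvTable rest).2 with
        | none => true
        | some x => x == ',' || x == '}' || x == ']' || x == ':') :=
      pvClosingScan_eq_table rest
    cases e with
    | true => simp [ih]
    | false =>
      by_cases hq : ch == '"'
      · by_cases hs : s
        · subst hs
          by_cases hc : pvClosingScan rest
          · simp [hc, ← hcl, ih]
          · simp [hc, ← hcl, ih, (by simpa using hq : ch = '"')]
        · simp [hs, ← hcl, ih, (by simpa using hq : ch = '"')]
      · by_cases hb : ch == '\\' <;> simp [hq, hb, ih]

-- ===== VERDICT (by name: the statement is the Claim_ definition above) =====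
theorem repair_json_text_spec : Claim_equal_repair_json_text := by
  intro text _
  unfold Spec_repair_json_text repair_json_text repair_json_text_alt
  rw [pvLoop_eq]
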